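-- pv_equiv track=rewrite | github.com/MrDurvesh11/Odyssey_Of_Code_Hackathon | rfp-analyzer/utils/processors.py | detect_tables
-- ===== SOURCE A (Python) =====
-- def detect_tables(text):
--     """Basic detection of tabular data in text"""
--     # Simple heuristic: look for patterns that suggest tables
--     lines = text.split('\n')
--     table_start_indices = []
--     table_end_indices = []
--
--     in_table = False
--     for i, line in enumerate(lines):
--         # Check for lines with multiple delimiters suggesting table structure
--         delimiter_count = sum(line.count(delim) for delim in ['|', '\t', '  '])
--
--         if not in_table and delimiter_count >= 3:
--             in_table = True
--             table_start_indices.append(i)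
--         elif in_table and delimiter_count < 3:
--             in_table = False
--             table_end_indices.append(i)
--
--     # Handle case where document ends while still in a table
--     if in_table:
--         table_end_indices.append(len(lines))
--
--     # Extract table content
--     tables = []
--     for start, end in zip(table_start_indices, table_end_indices):
--         tables.append('\n'.join(lines[start:end]))
--
--     return tables
-- ===== SOURCE B (Python) =====
-- from itertools import groupby
--
--
-- def detect_tables(text):
--     """Basic detection of tabular data in text"""
--     def is_table(line):
--         return line.count('|') + line.count('\t') + line.count('  ') >= 3
--
--     return ['\n'.join(group)
--             for is_tab, group in groupby(text.split('\n'), key=is_table)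
--             if is_tab]
-- ===== Notes on version B (the rewrite author's own statement) =====
-- stated objective: simpler
-- what changed: Replaces A's in_table flag with start/end index lists, the end-of-document patch and the zip/slice extraction pass by a one-liner: classify each line with a predicate and join the maximal consecutive True-runs produced by itertools.groupby.
import Mathlib
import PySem

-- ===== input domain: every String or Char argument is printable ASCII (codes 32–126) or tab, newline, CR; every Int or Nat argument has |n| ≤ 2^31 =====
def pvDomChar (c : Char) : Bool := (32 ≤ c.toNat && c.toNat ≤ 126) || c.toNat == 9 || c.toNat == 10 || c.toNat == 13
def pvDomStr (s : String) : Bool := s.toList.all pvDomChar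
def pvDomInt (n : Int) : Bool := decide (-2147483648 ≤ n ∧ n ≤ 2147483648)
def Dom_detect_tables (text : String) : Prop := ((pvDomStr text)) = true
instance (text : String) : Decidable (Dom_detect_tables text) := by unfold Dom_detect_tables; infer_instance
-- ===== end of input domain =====

-- B replaces A's in_table flag + start/end index lists + zip/slice extraction by a
-- groupby-style decomposition: classify each line, join maximal consecutive table runs (objective: simpler).


-- ===== PORT A =====
-- delimiter_count = sum(line.count(delim) for delim in ['|', '\t', '  '])
def pvDelimCount (line : String) : Int :=
  (["|", "\t", "  "].map (fun d => (PySem.Str.count line d : Int))).sum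

-- the body of A's 'for i, line in enumerate(lines)' loop over state (in_table, starts, ends)
def pvStepA (st : Bool × List Int × List Int) (p : Int × String) : Bool × List Int × List Int :=
  let dc := pvDelimCount p.2
  if st.1 = false ∧ 3 ≤ dc then (true, st.2.1 ++ [p.1], st.2.2)
  else if st.1 = true ∧ dc < 3 then (false, st.2.1, st.2.2 ++ [p.1])
  else st

-- the tail of A: the end-of-document patch, then the zip/slice extraction loop
def pvExtractA (lines : List String) (st : Bool × List Int × List Int) : List String :=
  let ends := if st.1 = true then st.2.2 ++ [(lines.length : Int)] else st.2.2
  (st.2.1.zip ends).foldl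
    (fun tables se => tables ++ [PySem.Str.join "\n" (PySem.List.slice lines (some se.1) (some se.2))]) []

def detect_tables (text : String) : List String :=
  let lines := (PySem.Str.split? text "\n").getD []   -- sep ≠ "", so split? never returns none
  pvExtractA lines ((PySem.List.enumerate lines 0).foldl pvStepA (false, [], []))

-- ===== PORT B =====
def pvIsTable (line : String) : Bool :=
  decide (3 ≤ PySem.Str.count line "|" + PySem.Str.count line "\t" + PySem.Str.count line "  ")

-- itertools.groupby(lines, key=pvIsTable), keeping the joined True-groups
def pvGroupsB : List String → List String
  | [] => []
  | l :: rest =>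
    let k := pvIsTable l
    let run := l :: rest.takeWhile (fun x => pvIsTable x == k)
    let rest' := rest.dropWhile (fun x => pvIsTable x == k)
    (if k then [PySem.Str.join "\n" run] else []) ++ pvGroupsB rest'
termination_by ls => ls.length
decreasing_by
  simp only [List.length_cons]
  have := List.length_dropWhile_le (fun x => pvIsTable x == pvIsTable l) rest
  omega

def detect_tables_alt (text : String) : List String :=
  pvGroupsB ((PySem.Str.split? text "\n").getD [])

-- ===== PRECONDITION & SPEC =====
def Spec_detect_tables (text : String) (out : List String) : Prop := out = detect_tables_alt text
instance (text : String) (out : List String) : Decidable (Spec_detect_tables text out) := by unfold Spec_detect_tables; infer_instance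

-- ===== CLAIM (what is proved, stated in full; the proofs are below) =====
def Claim_equal_detect_tables : Prop := ∀ (text : String), Dom_detect_tables text → Spec_detect_tables text (detect_tables text)

-- ===== LEMMAS AND PROOFS =====

-- A's int delimiter count is the Nat sum B classifies with
lemma pvDelimCount_eq (l : String) :
    pvDelimCount l = ((PySem.Str.count l "|" + PySem.Str.count l "\t" + PySem.Str.count l "  " : Nat) : Int) := by
  simp [pvDelimCount]; ring

lemma pvIsTable_iff (l : String) : pvIsTable l = true ↔ 3 ≤ pvDelimCount l := by
  rw [pvDelimCount_eq, pvIsTable]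
  simp; omega

-- relative-index recursion equivalent to A's indexed fold (proof device)
def pvScan : List String → Bool → Bool × List Int × List Int
  | [], b => (b, [], [])
  | l :: ls, b =>
    let d := pvDelimCount l
    if b = false ∧ 3 ≤ d then
      let r := pvScan ls true
      (r.1, 0 :: r.2.1.map (· + 1), r.2.2.map (· + 1))
    else if b = true ∧ d < 3 then
      let r := pvScan ls false
      (r.1, r.2.1.map (· + 1), 0 :: r.2.2.map (· + 1))
    else
      let r := pvScan ls b
      (r.1, r.2.1.map (· + 1), r.2.2.map (· + 1))

lemma pvMap_shift (s : List Int) (i : Int) :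
    (s.map (· + 1)).map (· + i) = s.map (· + (i + 1)) := by
  rw [List.map_map]
  apply List.map_congr_left
  intro a _
  simp [Function.comp]; ring

lemma pvFold_eq_scan (ls : List String) (b : Bool) (i : Int) (S E : List Int) :
    (PySem.List.enumerate ls i).foldl pvStepA (b, S, E)
      = ((pvScan ls b).1, S ++ (pvScan ls b).2.1.map (· + i), E ++ (pvScan ls b).2.2.map (· + i)) := by
  induction ls generalizing b i S E with
  | nil => simp [PySem.List.enumerate, pvScan]
  | cons l ls ih =>
    rw [PySem.List.enumerate_cons]
    simp only [List.foldl_cons]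
    by_cases h1 : b = false ∧ 3 ≤ pvDelimCount l
    · rw [show pvStepA (b, S, E) (i, l) = (true, S ++ [i], E) by simp [pvStepA, h1.1, h1.2]]
      rw [ih true (i + 1) (S ++ [i]) E]
      have hs : pvScan (l :: ls) b
          = ((pvScan ls true).1, 0 :: (pvScan ls true).2.1.map (· + 1),
             (pvScan ls true).2.2.map (· + 1)) := by
        simp only [pvScan]
        rw [if_pos (by simp [h1.1, h1.2])]
      rw [hs, List.map_cons, pvMap_shift, pvMap_shift]
      simp
    · by_cases h2 : b = true ∧ pvDelimCount l < 3
      · rw [show pvStepA (b, S, E) (i, l) = (false, S, E ++ [i]) by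
          simp only [pvStepA]; rw [if_neg h1, if_pos h2]]
        rw [ih false (i + 1) S (E ++ [i])]
        have hs : pvScan (l :: ls) b
            = ((pvScan ls false).1, (pvScan ls false).2.1.map (· + 1),
               0 :: (pvScan ls false).2.2.map (· + 1)) := by
          simp only [pvScan]
          rw [if_neg h1, if_pos h2]
        rw [hs, List.map_cons, pvMap_shift, pvMap_shift]
        simp
      · rw [show pvStepA (b, S, E) (i, l) = (b, S, E) by
          simp only [pvStepA]; rw [if_neg h1, if_neg h2]]
        rw [ih b (i + 1) S E]
        have hs : pvScan (l :: ls) b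
            = ((pvScan ls b).1, (pvScan ls b).2.1.map (· + 1),
               (pvScan ls b).2.2.map (· + 1)) := by
          simp only [pvScan]
          rw [if_neg h1, if_neg h2]
        rw [hs, pvMap_shift, pvMap_shift]

lemma pvScan_nonneg (ls : List String) (b : Bool) :
    (∀ x ∈ (pvScan ls b).2.1, 0 ≤ x) ∧ (∀ x ∈ (pvScan ls b).2.2, 0 ≤ x) := by
  induction ls generalizing b with
  | nil => simp [pvScan]
  | cons l ls ih =>
    simp only [pvScan]
    split
    · obtain ⟨hs, he⟩ := ih true
      constructor
      · intro x hx
        simp only [List.mem_cons, List.mem_map] at hx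
        rcases hx with h | ⟨y, hy, rfl⟩
        · omega
        · have := hs y hy; omega
      · intro x hx
        simp only [List.mem_map] at hx
        obtain ⟨y, hy, rfl⟩ := hx
        have := he y hy; omega
    · split
      · obtain ⟨hs, he⟩ := ih false
        constructor
        · intro x hx
          simp only [List.mem_map] at hx
          obtain ⟨y, hy, rfl⟩ := hx
          have := hs y hy; omega
        · intro x hx
          simp only [List.mem_cons, List.mem_map] at hx
          rcases hx with h | ⟨y, hy, rfl⟩
          · omega
          · have := he y hy; omega
      · obtain ⟨hs, he⟩ := ih b
        constructor
        · intro x hx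
          simp only [List.mem_map] at hx
          obtain ⟨y, hy, rfl⟩ := hx
          have := hs y hy; omega
        · intro x hx
          simp only [List.mem_map] at hx
          obtain ⟨y, hy, rfl⟩ := hx
          have := he y hy; omega

-- scanning through an all-table prefix in table mode just shifts the indices
lemma pvScan_true_table (t : List String) (rest : List String)
    (ht : ∀ l ∈ t, pvIsTable l = true) :
    pvScan (t ++ rest) true
      = ((pvScan rest true).1,
         (pvScan rest true).2.1.map (· + (t.length : Int)),
         (pvScan rest true).2.2.map (· + (t.length : Int))) := by
  induction t with
  | nil => simp
  | cons l t ih =>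
    have hl : 3 ≤ pvDelimCount l := (pvIsTable_iff l).mp (ht l (by simp))
    have hrec := ih (fun x hx => ht x (by simp [hx]))
    simp only [List.cons_append, pvScan]
    rw [if_neg (by simp), if_neg (by simp; omega)]
    simp only [hrec]
    refine congrArg₂ Prod.mk rfl (congrArg₂ Prod.mk ?_ ?_)
    · rw [List.map_map]
      apply List.map_congr_left
      intro a _
      simp only [Function.comp]
      push_cast [List.length_cons]
      ring
    · rw [List.map_map]
      apply List.map_congr_left
      intro a _
      simp only [Function.comp]
      push_cast [List.length_cons]
      ring

-- entering a non-table line: table mode records relative end 0, otherwise same as non-table mode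
lemma pvScan_true_of_head_false (r : String) (rs : List String) (hr : pvIsTable r = false) :
    pvScan (r :: rs) true
      = ((pvScan (r :: rs) false).1, (pvScan (r :: rs) false).2.1,
         0 :: (pvScan (r :: rs) false).2.2) := by
  have hd : pvDelimCount r < 3 := by
    by_contra h'
    rw [(pvIsTable_iff r).mpr (by omega)] at hr
    exact Bool.true_eq_false.mp hr
  simp only [pvScan]
  rw [if_neg (by simp), if_pos (by simp [hd]), if_neg (by simp; omega), if_neg (by simp)]

-- scanning a whole table run followed by a non-table line, from non-table mode
lemma pvScan_run_cons (h : String) (t : List String) (r : String) (rs : List String)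
    (ht : ∀ l ∈ h :: t, pvIsTable l = true) (hr : pvIsTable r = false) :
    pvScan ((h :: t) ++ (r :: rs)) false
      = ((pvScan (r :: rs) false).1,
         0 :: (pvScan (r :: rs) false).2.1.map (· + ((h :: t).length : Int)),
         ((h :: t).length : Int) :: (pvScan (r :: rs) false).2.2.map (· + ((h :: t).length : Int))) := by
  have hh : 3 ≤ pvDelimCount h := (pvIsTable_iff h).mp (ht h (by simp))
  have h1 : pvScan ((h :: t) ++ (r :: rs)) false
      = ((pvScan (t ++ r :: rs) true).1,
         0 :: (pvScan (t ++ r :: rs) true).2.1.map (· + 1),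
         (pvScan (t ++ r :: rs) true).2.2.map (· + 1)) := by
    simp only [List.cons_append, pvScan]
    rw [if_pos (by simp [hh])]
  rw [h1, pvScan_true_table t (r :: rs) (fun x hx => ht x (by simp [hx])),
      pvScan_true_of_head_false r rs hr]
  refine congrArg₂ Prod.mk rfl (congrArg₂ Prod.mk ?_ ?_)
  · simp only [List.map_map, List.cons.injEq, true_and]
    apply List.map_congr_left
    intro a _
    simp only [Function.comp]
    push_cast [List.length_cons]; ring
  · simp only [List.map_cons, List.map_map, List.cons.injEq]
    constructor
    · push_cast [List.length_cons]; ring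
    · apply List.map_congr_left
      intro a _
      simp only [Function.comp]
      push_cast [List.length_cons]; ring

-- shifting both slice bounds past an appended prefix
lemma pvSlice_shift {α : Type} (xs ys : List α) (a b : Int) (ha : 0 ≤ a) (hb : 0 ≤ b) :
    PySem.List.slice (xs ++ ys) (some ((xs.length : Int) + a)) (some ((xs.length : Int) + b))
      = PySem.List.slice ys (some a) (some b) := by
  rw [PySem.List.slice_toNat _ (by positivity) (by positivity),
      PySem.List.slice_toNat _ ha hb]
  have h1 : ((xs.length : Int) + a).toNat = xs.length + a.toNat := by omega
  have h2 : ((xs.length : Int) + b).toNat = xs.length + b.toNat := by omega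
  rw [h1, h2, List.drop_append, List.drop_eq_nil_of_le (by omega), List.nil_append,
    show xs.length + a.toNat - xs.length = a.toNat by omega,
    show xs.length + b.toNat - (xs.length + a.toNat) = b.toNat - a.toNat by omega]

lemma pvSlice_head {α : Type} (pre rest : List α) :
    PySem.List.slice (pre ++ rest) (some 0) (some (pre.length : Int)) = pre := by
  rw [PySem.List.slice_toNat _ le_rfl (by positivity)]
  simp

-- the common tail of both extractions: shifted slices of pre ++ rest are slices of rest
lemma pvTail_shift (pre rest : List String) (S E : List Int)
    (hS : ∀ x ∈ S, 0 ≤ x) (hE : ∀ x ∈ E, 0 ≤ x) :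
    List.map (fun se => PySem.Str.join "\n" (PySem.List.slice (pre ++ rest) (some se.1) (some se.2)))
        ((S.map (· + (pre.length : Int))).zip (E.map (· + (pre.length : Int))))
      = List.map (fun se => PySem.Str.join "\n" (PySem.List.slice rest (some se.1) (some se.2))) (S.zip E) := by
  rw [List.zip_map, List.map_map]
  apply List.map_congr_left
  intro a ha
  obtain ⟨h1, h2⟩ := List.of_mem_zip ha
  simp only [Function.comp, Prod.map]
  rw [show a.1 + (pre.length : Int) = (pre.length : Int) + a.1 by ring,
      show a.2 + (pre.length : Int) = (pre.length : Int) + a.2 by ring,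
      pvSlice_shift _ _ _ _ (hS a.1 h1) (hE a.2 h2)]

-- one joined table run comes off the front of A's extraction
lemma pvExtractA_run (run rest : List String) (hne : run ≠ [])
    (ht : ∀ l ∈ run, pvIsTable l = true)
    (hrest : ∀ r ∈ rest.head?, pvIsTable r = false) :
    pvExtractA (run ++ rest) (pvScan (run ++ rest) false)
      = PySem.Str.join "\n" run :: pvExtractA rest (pvScan rest false) := by
  obtain ⟨h, t, rfl⟩ := List.exists_cons_of_ne_nil hne
  match rest, hrest with
  | [], _ =>
    have hh : 3 ≤ pvDelimCount h := (pvIsTable_iff h).mp (ht h (by simp))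
    have hscan : pvScan ((h :: t) ++ ([] : List String)) false = (true, [0], []) := by
      rw [List.append_nil]
      have h1 : pvScan (h :: t) false
          = ((pvScan t true).1, 0 :: (pvScan t true).2.1.map (· + 1),
             (pvScan t true).2.2.map (· + 1)) := by
        simp only [pvScan]
        rw [if_pos (by simp [hh])]
      rw [h1, show t = t ++ ([] : List String) by simp,
          pvScan_true_table t [] (fun x hx => ht x (by simp at hx ⊢; exact Or.inr hx))]
      simp [pvScan]
    rw [hscan]
    have hsl : PySem.List.slice (h :: t) (some 0) (some ((h :: t).length : Int)) = h :: t := by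
      have := pvSlice_head (h :: t) ([] : List String)
      rwa [List.append_nil] at this
    have hsl' : PySem.List.slice (h :: t) (some 0) (some ((t.length : Int) + 1)) = h :: t := by
      rw [show ((t.length : Int) + 1) = (((h :: t).length : Nat) : Int) by
        push_cast [List.length_cons]; ring]
      exact hsl
    simp [pvExtractA, pvScan, List.zip, hsl']
  | r :: rs, hrest =>
    rw [pvScan_run_cons h t r rs ht (hrest r rfl)]
    have hnn := pvScan_nonneg (r :: rs) false
    set p := pvScan (r :: rs) false with hp
    set k : Int := ((h :: t).length : Int) with hkdef
    simp only [pvExtractA]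
    have hlen : (((h :: t) ++ r :: rs).length : Int) = ((r :: rs).length : Int) + k := by
      rw [hkdef]; push_cast [List.length_append]; ring
    by_cases hp1 : p.1 = true
    · rw [if_pos (by exact hp1), if_pos (by exact hp1)]
      have hE : (k :: p.2.2.map (· + k)) ++ [(((h :: t) ++ r :: rs).length : Int)]
          = k :: (p.2.2 ++ [((r :: rs).length : Int)]).map (· + k) := by
        rw [hlen]
        simp [List.map_append]
      rw [hE, List.zip_cons_cons]
      simp only [PySem.List.foldl_append_singleton_eq_map, List.nil_append, List.map_cons]
      rw [pvSlice_head (h :: t) (r :: rs)]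
      rw [pvTail_shift (h :: t) (r :: rs) p.2.1 (p.2.2 ++ [((r :: rs).length : Int)]) hnn.1
            (by intro x hx
                rcases List.mem_append.mp hx with h' | h'
                · exact hnn.2 x h'
                · simp at h'; omega)]
    · rw [if_neg (by exact hp1), if_neg (by exact hp1), List.zip_cons_cons]
      simp only [PySem.List.foldl_append_singleton_eq_map, List.nil_append, List.map_cons]
      rw [pvSlice_head (h :: t) (r :: rs)]
      rw [pvTail_shift (h :: t) (r :: rs) p.2.1 p.2.2 hnn.1 hnn.2]

-- skipping one non-table line in non-table mode
lemma pvExtractA_skip (l : String) (ls : List String) (hl : pvIsTable l = false) :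
    pvExtractA (l :: ls) (pvScan (l :: ls) false) = pvExtractA ls (pvScan ls false) := by
  have hd : ¬ 3 ≤ pvDelimCount l := by
    intro h; rw [(pvIsTable_iff l).mpr h] at hl; exact Bool.true_eq_false.mp hl
  have hscan : pvScan (l :: ls) false
      = ((pvScan ls false).1, (pvScan ls false).2.1.map (· + 1), (pvScan ls false).2.2.map (· + 1)) := by
    simp only [pvScan]
    rw [if_neg (by simp; omega), if_neg (by simp)]
  rw [hscan]
  have hnn := pvScan_nonneg ls false
  set p := pvScan ls false with hp
  simp only [pvExtractA]
  have hone : (1 : Int) = ((([l] : List String).length : Int)) := by simp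
  by_cases hp1 : p.1 = true
  · rw [if_pos (by exact hp1), if_pos (by exact hp1)]
    have hE : p.2.2.map (· + 1) ++ [((l :: ls).length : Int)]
        = (p.2.2 ++ [(ls.length : Int)]).map (· + 1) := by
      simp
    rw [hE]
    simp only [PySem.List.foldl_append_singleton_eq_map, List.nil_append]
    rw [show (fun x : Int => x + 1) = (fun x : Int => x + ((([l] : List String).length : Int))) from by
          funext x; simp]
    exact pvTail_shift [l] ls p.2.1 (p.2.2 ++ [(ls.length : Int)]) hnn.1
      (by intro x hx
          rcases List.mem_append.mp hx with h' | h'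
          · exact hnn.2 x h'
          · simp at h'; omega)
  · rw [if_neg (by exact hp1), if_neg (by exact hp1)]
    simp only [PySem.List.foldl_append_singleton_eq_map, List.nil_append]
    rw [show (fun x : Int => x + 1) = (fun x : Int => x + ((([l] : List String).length : Int))) from by
          funext x; simp]
    exact pvTail_shift [l] ls p.2.1 p.2.2 hnn.1 hnn.2

lemma pvGroupsB_cons (l : String) (rest : List String) :
    pvGroupsB (l :: rest)
      = (if pvIsTable l then
          [PySem.Str.join "\n" (l :: rest.takeWhile (fun x => pvIsTable x == pvIsTable l))]
         else []) ++ pvGroupsB (rest.dropWhile (fun x => pvIsTable x == pvIsTable l)) := by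
  rw [pvGroupsB]

lemma pvGroupsB_nil : pvGroupsB [] = [] := by
  rw [pvGroupsB]

lemma pvGroupsB_skip (l : String) (ls : List String) (hl : pvIsTable l = false) :
    pvGroupsB (l :: ls) = pvGroupsB ls := by
  rw [pvGroupsB_cons]
  simp only [hl, if_neg (Bool.false_ne_true), List.nil_append]
  match ls with
  | [] => simp
  | r :: rs =>
    by_cases hr : pvIsTable r = false
    · rw [List.dropWhile_cons, if_pos (by simp [hr])]
      rw [pvGroupsB_cons]
      simp [hr]
    · have hr' : pvIsTable r = true := by revert hr; cases pvIsTable r <;> simp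
      rw [List.dropWhile_cons, if_neg (by simp [hr'])]

lemma pvMain (n : Nat) : ∀ (lines : List String), lines.length ≤ n →
    pvExtractA lines (pvScan lines false) = pvGroupsB lines := by
  induction n with
  | zero =>
    intro lines h
    rw [List.length_eq_zero_iff.mp (Nat.le_zero.mp h), pvGroupsB_nil]
    rfl
  | succ n ih =>
    intro lines h
    match lines with
    | [] => rw [pvGroupsB_nil]; rfl
    | l :: ls =>
      by_cases hl : pvIsTable l = true
      · set run : List String := l :: ls.takeWhile pvIsTable with hrun
        set rest : List String := ls.dropWhile pvIsTable with hrest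
        have hsplit : l :: ls = run ++ rest := by
          rw [hrun, hrest]; simp [List.takeWhile_append_dropWhile]
        have htbl : ∀ x ∈ run, pvIsTable x = true := by
          intro x hx
          rw [hrun] at hx
          rcases List.mem_cons.mp hx with rfl | hx
          · exact hl
          · exact List.mem_takeWhile_imp hx
        have hhd : ∀ r ∈ rest.head?, pvIsTable r = false := by
          intro r hr
          rw [Option.mem_def] at hr
          have := List.head?_dropWhile_not pvIsTable ls
          rw [← hrest, hr] at this
          exact this
        have hlen : rest.length ≤ n := by
          have h1 : rest.length ≤ ls.length := by
            rw [hrest]; exact List.length_dropWhile_le _ _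
          simp at h; omega
        rw [hsplit, pvExtractA_run run rest (by rw [hrun]; simp) htbl hhd, ih rest hlen,
          ← hsplit, pvGroupsB_cons]
        simp [hl, hrun, hrest]
      · have hl' : pvIsTable l = false := by simpa using hl
        rw [pvExtractA_skip l ls hl', pvGroupsB_skip l ls hl']
        exact ih ls (by simp at h; omega)

-- ===== VERDICT (by name: the statement is the Claim_ definition above) =====
theorem detect_tables_spec : Claim_equal_detect_tables := by
  intro text _
  show detect_tables text = detect_tables_alt text
  rw [detect_tables, detect_tables_alt]
  set lines := (PySem.Str.split? text "\n").getD []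
  rw [pvFold_eq_scan lines false 0 [] []]
  have hmap : ∀ s : List Int, s.map (· + (0 : Int)) = s := by
    intro s; simp
  simp only [hmap, List.nil_append]
  exact pvMain lines.length lines le_rfl
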